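-- pv_equiv track=rewrite | github.com/QuBenhao/LeetCode | LCP/36/solution.py | maxGroupNumber
-- ===== SOURCE A (Python) =====
-- from collections import Counter
--
-- def maxGroupNumber(tiles):
--     """
--     :type tiles: List[int]
--     :rtype: int
--     """
--     # counts = Counter(tiles)
--     # # dp[x][y] 表示
--     # # 在预留x张(tile-2)和y张(tile-1)的前提下，
--     # # (tile)之前的牌能组成的牌组数
--     # dp = [[-1] * 5 for _ in range(5)]
--     # dp[0][0] = 0
--     # prev_tile = 0 # 前一张牌的点数
--     # # 每三个相同的顺子可以替换成三组的刻子，所以考虑组成的顺子数为0,1,2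
--     # for tile in sorted(counts.keys()):
--     #     cnt = counts[tile]
--     #     # 如果上一张牌和这张牌没法练起来，
--     #     # 意味着无论之前留几张牌，都无法和tile组成数字，
--     #     # 只能保留dp[0][0]，即一张不留的最大结果
--     #     # 相当于在这里递归了maxGroupNumber
--     #     if prev_tile != tile - 1:
--     #         ldp = dp[0][0]
--     #         dp = [[-1] * 5 for _ in range(5)]
--     #         dp[0][0] = ldp
--     #     # 新的dp数组
--     #     new_dp = [[-1] * 5 for _ in range(5)]
--     #     for cnt_2 in range(0, 5): # (tile-2)的牌数
--     #         for cnt_1 in range(0, 5): # (tile-1)的牌数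
--     #             # 如果牌数不够
--     #             if dp[cnt_2][cnt_1] < 0:
--     #                 continue
--     #             # 顺子的数量为三者最多的最小值且小于等于2
--     #             for sz in range(0, min(cnt_2, cnt_1, cnt) + 1):
--     #                 new_2 = cnt_1 - sz # 当前的_1是下一个的_2
--     #                 for new_1 in range(0, min(4, cnt - sz) + 1):
--     #                     new_dp[new_2][new_1] = max(new_dp[new_2][new_1],
--     #                                                dp[cnt_2][cnt_1] + sz +(cnt - sz -new_1)//3)
--     #     dp = new_dp
--     #     prev_tile = tile
--     #
--     # return max(max(i) for i in dp)
--
--     tiles = Counter(tiles)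
--     nums = sorted(tiles)
--     # dp滚动更新，存储的是num的上一个数last_num组成的结尾为last_num+1和结尾为last_num+2的顺子数
--     dp = {(0, 0): 0}
--     # nums中有断层，或者，假如没有num+2，也就是num+1为最大值的时候,动态规划更新d是否正确？
--     # 因为当num遍历到最大值（断层）时，v1必然是0，那么所有大于0的d1都不会出现在最后一轮的d的循环中;
--     # 满足条件的只有d1=0的情况，而d1=0的循环中，d也必然是0,新的dp只有(0,0)是有值的,也就是之前d0的分配所组成的最大值;
--     # 这也符合实际的逻辑，如果没有tiles里面num+1，那就无法构成num-1,num,num+1的顺子和num,num+1,num+2的顺子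
--     for num in nums:
--         v0, v1 = tiles[num], tiles[num+1]
--         new_dp = Counter()
--         # 枚举用num-2,num-1,num 和 num-1,num,num+1能组成的顺子中,num和num+1的使用情况
--         for (d0, d1), c in dp.items():
--             # 枚举所有num和num+1已经使用的情况
--             t0, t1 = v0 - d0, v1 - d1
--             for d in range(min(t0, t1, 2) + 1):
--                 # num+1变为下一个num,num+1使用情况为:原来使用的 d1 + 当前组成新的顺子使用的 d
--                 # num+2要使用掉 d
--                 k = (d1 + d, d)
--                 # 动态规划, k的使用情况的最大结果为 原来凑成的顺子数 + 新凑出的顺子数 + 剩余num可以组成的刻子数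
--                 # 到这里所有num能使用的情况已经枚举完毕，剩余的num必然是按刻子分
--                 # 当前num的使用：
--                 # 组成d0-d1个num-2,num-1,num的顺子，
--                 # 组成d1个num-1,num,num+1的顺子，
--                 # 组成d个num,num+1,num+2个顺子
--                 new_dp[k] = max(new_dp[k], c + d + (t0 - d) // 3)
--         dp = new_dp
--     return max(dp.values())
-- ===== SOURCE B (Python) =====
-- from collections import Counter
--
-- def _solve(counts):
--     # counts: multiplicities of one maximal consecutive run of values.
--     # g(i, a, b): best number of groups formable from counts[i:] when a (resp. b)
--     # straights started two (resp. one) positions earlier still reserve one copy of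
--     # counts[i]; started straights are counted immediately, None = infeasible.
--     n = len(counts)
--     memo = {}
--     def g(i, a, b):
--         if i == n:
--             return 0 if a == 0 and b == 0 else None
--         key = (i, a, b)
--         if key in memo:
--             return memo[key]
--         avail = counts[i] - a - b
--         best = None
--         if avail >= 0:
--             for s in range(min(avail, 2) + 1):
--                 tail = g(i + 1, b, s)
--                 if tail is not None:
--                     cand = s + (avail - s) // 3 + tail
--                     if best is None or cand > best:
--                         best = cand
--         memo[key] = best
--         return best
--     # on a long run, seed the memo back-to-front in chunks so that no call
--     # recurses more than a few hundred frames deep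
--     for i in range(n, 399, -400):
--         for a in range(3):
--             for b in range(3):
--                 g(i, a, b)
--     return g(0, 0, 0)
--
-- def maxGroupNumber(tiles):
--     cnt = Counter(tiles)
--     vals = sorted(cnt)
--     total = 0
--     i = 0
--     while i < len(vals):
--         j = i + 1
--         while j < len(vals) and vals[j] == vals[j - 1] + 1:
--             j += 1
--         total += _solve([cnt[v] for v in vals[i:j]])
--         i = j
--     return total
-- ===== Notes on version B (the rewrite author's own statement) =====
-- stated objective: alternative
-- what changed: Replaces A's single forward pass that scatters capped usage-states through a Counter-merged dict by a staged decomposition: split the sorted distinct values into maximal consecutive runs, solve each run independently by top-down memoized recursion over (position, reserved-prev, reserved-curr) with None marking infeasible reservations, and sum the per-run answers.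
import Mathlib
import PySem

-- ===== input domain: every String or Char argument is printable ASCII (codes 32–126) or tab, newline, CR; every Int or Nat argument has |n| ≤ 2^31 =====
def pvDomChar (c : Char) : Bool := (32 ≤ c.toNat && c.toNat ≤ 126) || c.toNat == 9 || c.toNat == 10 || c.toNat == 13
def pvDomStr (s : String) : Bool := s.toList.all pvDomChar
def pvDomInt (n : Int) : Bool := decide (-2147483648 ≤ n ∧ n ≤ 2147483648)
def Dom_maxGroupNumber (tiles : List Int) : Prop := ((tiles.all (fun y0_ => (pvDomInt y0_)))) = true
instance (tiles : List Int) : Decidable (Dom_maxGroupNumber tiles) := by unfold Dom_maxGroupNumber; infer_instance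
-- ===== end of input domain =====

-- B decomposes the problem: it splits the sorted distinct values into maximal consecutive
-- runs and solves each run by top-down memoized recursion, instead of A's single forward
-- dict-scatter DP; same return value, similar cost.

-- ===== PORT A =====
-- body of A's 'for num in nums' loop (dp is the dict {(d0,d1): groups})
def stepA (cnt : PySem.Dict Int Int) (dp : PySem.Dict (Int × Int) Int) (num : Int) :
    PySem.Dict (Int × Int) Int :=
  let v0 := cnt.getD num 0
  let v1 := cnt.getD (num + 1) 0
  dp.items.foldl (fun nd kv =>
      (PySem.List.pyRange 0 (min (min (v0 - kv.1.1) (v1 - kv.1.2)) 2 + 1) 1).foldl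
        (fun nd d =>
          nd.insert (kv.1.2 + d, d)
            (max (nd.getD (kv.1.2 + d, d) 0)
                 (kv.2 + d + PySem.Int.floordiv (v0 - kv.1.1 - d) 3)))
        nd)
    PySem.Dict.empty

-- 'max(dp.values())': dp is never empty (the state (0,0) always survives), so maxD's
-- default 0 is never consulted on inputs A returns on.
def maxGroupNumber (tiles : List Int) : Int :=
  let cnt := PySem.Dict.counter tiles
  let nums := PySem.List.sorted cnt.keys (fun x => x) false
  let dp := nums.foldl (stepA cnt) (PySem.Dict.ofList [(((0 : Int), (0 : Int)), (0 : Int))])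
  PySem.List.maxD dp.values (fun x => x) 0

-- ===== PORT B =====
-- _split_run: first maximal consecutive run of the sorted distinct values, and the rest
def takeRunB (v : Int) (rest : List Int) : List Int × List Int :=
  match rest with
  | [] => ([v], [])
  | w :: t =>
    if w = v + 1 then ((v :: (takeRunB w t).1), (takeRunB w t).2)
    else ([v], w :: t)

-- termination helper for solveAllB (the port cites it in decreasing_by)
theorem takeRunB_snd_length (v : Int) (rest : List Int) :
    (takeRunB v rest).2.length ≤ rest.length := by
  induction rest generalizing v with
  | nil => simp [takeRunB]
  | cons w t ih =>
    simp only [takeRunB]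
    split
    · exact le_trans (ih w) (Nat.le_succ _)
    · simp

-- the inner memoized g(i, a, b) of _solve; the memo dict is threaded through explicitly.
-- g is only ever called with i ≤ len(counts), so 'len ≤ i' is Python's 'i == len(counts)'
-- and counts.getD i 0 is exactly counts[i] on every reached call.
def gB (counts : List Int) (i : Nat) (a b : Int)
    (memo : PySem.Dict (Nat × Int × Int) (Option Int)) :
    Option Int × PySem.Dict (Nat × Int × Int) (Option Int) :=
  if _h : counts.length ≤ i then
    ((if a = 0 ∧ b = 0 then some 0 else none), memo)
  else
    match memo.get? (i, a, b) with
    | some r => (r, memo)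
    | none =>
      let avail := counts.getD i 0 - a - b
      let res :=
        if 0 ≤ avail then
          (PySem.List.pyRange 0 (min avail 2 + 1) 1).foldl
            (fun st s =>
              let pr := gB counts (i + 1) b s st.2
              match pr.1 with
              | none => (st.1, pr.2)
              | some t =>
                let cand := s + PySem.Int.floordiv (avail - s) 3 + t
                match st.1 with
                | none => (some cand, pr.2)
                | some bs => ((if cand > bs then some cand else some bs), pr.2))
            ((none : Option Int), memo)
        else ((none : Option Int), memo)
      (res.1, res.2.insert (i, a, b) res.1)
termination_by counts.length - i
decreasing_by omega

-- _solve: on a long run seed the memo back-to-front in chunks (the seeding calls only populate the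
-- memo; every i in the seeding range is ≥ 0, so i.toNat is exact), then evaluate g(0,0,0)
def solveRunB (counts : List Int) : Option Int :=
  let memo :=
    (PySem.List.pyRange counts.length 399 (-400)).foldl (fun memo i =>
      (PySem.List.pyRange 0 3 1).foldl (fun memo a =>
        (PySem.List.pyRange 0 3 1).foldl (fun memo b =>
          (gB counts i.toNat a b memo).2) memo) memo)
      PySem.Dict.empty
  (gB counts 0 0 0 memo).1

-- the while loop of maxGroupNumber, as recursion on the remaining sorted values;
-- _solve's g(0,0,0) never returns None, so getD 0 is never consulted.
def solveAllB (cnt : PySem.Dict Int Int) (vals : List Int) : Int :=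
  match vals with
  | [] => 0
  | v :: vr =>
    (solveRunB ((takeRunB v vr).1.map (fun u => cnt.getD u 0))).getD 0
      + solveAllB cnt (takeRunB v vr).2
termination_by vals.length
decreasing_by
  have := takeRunB_snd_length v vr
  simp only [List.length_cons]
  omega

def maxGroupNumber_alt (tiles : List Int) : Int :=
  let cnt := PySem.Dict.counter tiles
  solveAllB cnt (PySem.List.sorted cnt.keys (fun x => x) false)

-- ===== PRECONDITION & SPEC =====
def Spec_maxGroupNumber (tiles : List Int) (out : Int) : Prop := out = maxGroupNumber_alt tiles
instance (tiles : List Int) (out : Int) : Decidable (Spec_maxGroupNumber tiles out) := by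
  unfold Spec_maxGroupNumber; infer_instance

-- ===== CLAIM (what is proved, stated in full; the proofs are below) =====
def Claim_equal_maxGroupNumber : Prop := ∀ (tiles : List Int), Dom_maxGroupNumber tiles → Spec_maxGroupNumber tiles (maxGroupNumber tiles)

-- ===== LEMMAS AND PROOFS =====
-- ---------- generic option-max machinery ----------

def pvOM : Option Int → Option Int → Option Int
  | none, y => y
  | some a, none => some a
  | some a, some b => some (max a b)

def pvMaxL (L : List Int) : Option Int := L.foldl (fun o z => pvOM o (some z)) none

theorem pvOM_none_right (x : Option Int) : pvOM x none = x := by cases x <;> rfl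

theorem pvOM_assoc (x y z : Option Int) : pvOM (pvOM x y) z = pvOM x (pvOM y z) := by
  cases x <;> cases y <;> cases z <;> simp [pvOM, max_assoc]

theorem pvMaxL_foldl (L : List Int) : ∀ (o : Option Int),
    L.foldl (fun o z => pvOM o (some z)) o = pvOM o (pvMaxL L) := by
  induction L with
  | nil => intro o; simp [pvMaxL, pvOM_none_right]
  | cons x t ih =>
    intro o
    have h1 : pvMaxL (x :: t) = pvOM (some x) (pvMaxL t) := by
      simp only [pvMaxL, List.foldl_cons]
      exact ih (pvOM none (some x))
    simp only [List.foldl_cons]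
    rw [ih (pvOM o (some x)), h1, pvOM_assoc]

theorem pvMaxL_cons (x : Int) (t : List Int) : pvMaxL (x :: t) = pvOM (some x) (pvMaxL t) := by
  simp only [pvMaxL, List.foldl_cons]
  exact pvMaxL_foldl t (pvOM none (some x))

theorem pvMaxL_eq_none_iff (L : List Int) : pvMaxL L = none ↔ L = [] := by
  cases L with
  | nil => simp [pvMaxL]
  | cons x t =>
    rw [pvMaxL_cons]
    cases h : pvMaxL t <;> simp [pvOM]

theorem pvMaxL_mem (L : List Int) (m : Int) (h : pvMaxL L = some m) : m ∈ L := by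
  induction L generalizing m with
  | nil => simp [pvMaxL] at h
  | cons x t ih =>
    rw [pvMaxL_cons] at h
    cases ht : pvMaxL t with
    | none => rw [ht] at h; simp [pvOM] at h; simp [h]
    | some mt =>
      rw [ht] at h
      simp only [pvOM, Option.some_inj] at h
      rcases max_choice x mt with hc | hc
      · rw [← h, hc]; exact List.mem_cons_self
      · rw [← h, hc]; exact List.mem_cons_of_mem _ (ih mt ht)

theorem pvMaxL_isMax (L : List Int) (m : Int) (h : pvMaxL L = some m) :
    ∀ z ∈ L, z ≤ m := by
  induction L generalizing m with
  | nil => simp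
  | cons x t ih =>
    rw [pvMaxL_cons] at h
    intro z hz
    cases ht : pvMaxL t with
    | none =>
      rw [ht] at h; simp [pvOM] at h
      rw [pvMaxL_eq_none_iff] at ht
      subst ht
      simp at hz
      omega
    | some mt =>
      rw [ht] at h
      simp only [pvOM, Option.some_inj] at h
      rcases List.mem_cons.mp hz with rfl | hz'
      · omega
      · have := ih mt ht z hz'
        omega

theorem pvMaxL_some_of_mem (L : List Int) (z : Int) (h : z ∈ L) :
    ∃ m, pvMaxL L = some m ∧ z ≤ m := by
  cases hm : pvMaxL L with
  | none => rw [pvMaxL_eq_none_iff] at hm; subst hm; simp at h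
  | some m => exact ⟨m, rfl, pvMaxL_isMax L m hm z h⟩

theorem pvMaxL_eq_of_dominates (L M : List Int)
    (h1 : ∀ z ∈ L, ∃ y ∈ M, z ≤ y) (h2 : ∀ z ∈ M, ∃ y ∈ L, z ≤ y) :
    pvMaxL L = pvMaxL M := by
  cases hL : pvMaxL L with
  | none =>
    rw [pvMaxL_eq_none_iff] at hL
    subst hL
    cases hM : pvMaxL M with
    | none => rfl
    | some m =>
      obtain ⟨y, hy, _⟩ := h2 m (pvMaxL_mem M m hM)
      simp at hy
  | some m =>
    cases hM : pvMaxL M with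
    | none =>
      rw [pvMaxL_eq_none_iff] at hM
      subst hM
      obtain ⟨y, hy, _⟩ := h1 m (pvMaxL_mem L m hL)
      simp at hy
    | some m' =>
      obtain ⟨y, hy, hmy⟩ := h1 m (pvMaxL_mem L m hL)
      obtain ⟨y', hy', hmy'⟩ := h2 m' (pvMaxL_mem M m' hM)
      have h3 := pvMaxL_isMax M m' hM y hy
      have h4 := pvMaxL_isMax L m hL y' hy'
      have : m = m' := by omega
      rw [this]

theorem pv_foldl_max_le (L : List Int) (a M : Int) (h1 : a ≤ M) (h2 : ∀ z ∈ L, z ≤ M) :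
    L.foldl max a ≤ M := by
  induction L generalizing a with
  | nil => exact h1
  | cons z t ih =>
    exact ih (max a z) (max_le h1 (h2 z (List.mem_cons_self)))
      (fun w hw => h2 w (List.mem_cons_of_mem _ hw))

theorem pv_fdiv3_nonneg (a : Int) (h : 0 ≤ a) : 0 ≤ PySem.Int.floordiv a 3 := by
  rw [PySem.Int.floordiv_eq_ediv_of_pos (by omega)]
  exact Int.ediv_nonneg h (by omega)

theorem pyRange_one_eq_nil (a b : Int) (h : b ≤ a) : PySem.List.pyRange a b 1 = [] := by
  apply List.eq_nil_of_length_eq_zero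
  rw [PySem.List.length_pyRange_one]
  omega
-- ---------- the backward recursion gS (the mathematical content of B's g) ----------

def gS (l : List Int) (a b : Int) : Option Int :=
  match l with
  | [] => if a = 0 ∧ b = 0 then some 0 else none
  | c :: rest =>
    pvMaxL ((PySem.List.pyRange 0 (min (c - a - b) 2 + 1) 1).filterMap
      (fun s => (gS rest b s).map (fun t => s + PySem.Int.floordiv (c - a - b - s) 3 + t)))
termination_by l.length

def gSl (c : Int) (rest : List Int) (a b : Int) : List Int :=
  (PySem.List.pyRange 0 (min (c - a - b) 2 + 1) 1).filterMap
    (fun s => (gS rest b s).map (fun t => s + PySem.Int.floordiv (c - a - b - s) 3 + t))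

theorem gS_nil (a b : Int) : gS [] a b = if a = 0 ∧ b = 0 then some 0 else none := by
  simp [gS]

theorem gS_cons (c : Int) (rest : List Int) (a b : Int) :
    gS (c :: rest) a b = pvMaxL (gSl c rest a b) := by
  rw [gS, gSl]

theorem mem_gSl (c : Int) (rest : List Int) (a b z : Int) :
    z ∈ gSl c rest a b ↔ ∃ s t, 0 ≤ s ∧ s ≤ min (c - a - b) 2 ∧ gS rest b s = some t ∧
      z = s + PySem.Int.floordiv (c - a - b - s) 3 + t := by
  simp only [gSl, List.mem_filterMap, PySem.List.mem_pyRange_one, Option.map_eq_some_iff]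
  constructor
  · rintro ⟨s, ⟨h0, h1⟩, t, ht, rfl⟩
    exact ⟨s, t, h0, by omega, ht, rfl⟩
  · rintro ⟨s, t, h0, h1, ht, rfl⟩
    exact ⟨s, ⟨h0, by omega⟩, t, ht, rfl⟩

theorem gS_avail_nonneg (c : Int) (rest : List Int) (a b t : Int)
    (h : gS (c :: rest) a b = some t) : 0 ≤ c - a - b := by
  rw [gS_cons] at h
  obtain ⟨s, t', h0, h1, _, _⟩ := (mem_gSl c rest a b t).mp (pvMaxL_mem _ _ h)
  omega

theorem gS_zero_some (cs : List Int) (h : ∀ c ∈ cs, 0 ≤ c) :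
    ∃ t, gS cs 0 0 = some t ∧ 0 ≤ t := by
  induction cs with
  | nil => exact ⟨0, by simp [gS_nil], le_refl 0⟩
  | cons c rest ih =>
    obtain ⟨t0, h0, ht0⟩ := ih (fun x hx => h x (List.mem_cons_of_mem _ hx))
    have hc : 0 ≤ c := h c List.mem_cons_self
    have hz : (0 + PySem.Int.floordiv (c - 0 - 0 - 0) 3 + t0) ∈ gSl c rest 0 0 := by
      rw [mem_gSl]
      exact ⟨0, t0, le_refl 0, by omega, h0, rfl⟩
    obtain ⟨m, hm, hle⟩ := pvMaxL_some_of_mem _ _ hz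
    refine ⟨m, by rw [gS_cons, hm], ?_⟩
    have := pv_fdiv3_nonneg (c - 0 - 0 - 0) (by omega)
    omega

-- ---------- B's memoized g computes gS ----------

def MemoOK (counts : List Int) (memo : PySem.Dict (Nat × Int × Int) (Option Int)) : Prop :=
  ∀ i a b r, memo.get? (i, a, b) = some r → r = gS (counts.drop i) a b

-- the inner 'for s in range(...)' fold of g, for an abstract recursive call G
def pvGStep {D : Type} (G : Int → D → Option Int × D) (c3 : Int)
    (st : Option Int × D) (s : Int) : Option Int × D :=
  let pr := G s st.2
  match pr.1 with
  | none => (st.1, pr.2)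
  | some t =>
    let cand := s + PySem.Int.floordiv (c3 - s) 3 + t
    match st.1 with
    | none => (some cand, pr.2)
    | some bs => ((if cand > bs then some cand else some bs), pr.2)

theorem pvGStep_eq {D : Type} (G : Int → D → Option Int × D) (c3 : Int) (b1 : Option Int)
    (m1 : D) (s : Int) (fs : Option Int) (hg1 : (G s m1).1 = fs) :
    pvGStep G c3 (b1, m1) s
      = (pvOM b1 (fs.map (fun t => s + PySem.Int.floordiv (c3 - s) 3 + t)), (G s m1).2) := by
  simp only [pvGStep]
  rw [hg1]
  cases fs with
  | none =>
    simp only [Option.map_none]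
    rw [pvOM_none_right]
  | some t =>
    simp only [Option.map_some]
    cases b1 with
    | none => rfl
    | some bs =>
      simp only [pvOM, Prod.mk.injEq]
      refine ⟨?_, trivial⟩
      split_ifs with hlt
      · congr 1
        omega
      · congr 1
        omega

theorem pv_gfold {D : Type} {G : Int → D → Option Int × D} {F : Int → Option Int} {P : D → Prop}
    (hG : ∀ s m, P m → (G s m).1 = F s ∧ P (G s m).2) (c3 : Int) :
    ∀ (L : List Int) (st : Option Int × D), P st.2 →
    (L.foldl (pvGStep G c3) st).1
      = pvOM st.1 (pvMaxL (L.filterMap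
          (fun s => (F s).map (fun t => s + PySem.Int.floordiv (c3 - s) 3 + t)))) ∧
    P (L.foldl (pvGStep G c3) st).2 := by
  intro L
  induction L with
  | nil =>
    intro st hst
    simp only [List.foldl_nil, List.filterMap_nil]
    exact ⟨(pvOM_none_right st.1).symm, hst⟩
  | cons s L ihL =>
    rintro ⟨b1, m1⟩ hst
    obtain ⟨hg1, hg2⟩ := hG s m1 hst
    rw [List.foldl_cons, pvGStep_eq G c3 b1 m1 s (F s) hg1, List.filterMap_cons]
    obtain ⟨h1', h2'⟩ :=
      ihL (pvOM b1 ((F s).map (fun t => s + PySem.Int.floordiv (c3 - s) 3 + t)), (G s m1).2) hg2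
    refine ⟨?_, h2'⟩
    rw [h1']
    cases hF : F s with
    | none =>
      simp only [Option.map_none]
      rw [pvOM_none_right]
    | some t =>
      simp only [Option.map_some]
      rw [pvMaxL_cons, ← pvOM_assoc]

theorem gB_ok : ∀ (n : Nat) (counts : List Int) (i : Nat) (a b : Int)
    (memo : PySem.Dict (Nat × Int × Int) (Option Int)),
    counts.length - i ≤ n → MemoOK counts memo →
    (gB counts i a b memo).1 = gS (counts.drop i) a b ∧
      MemoOK counts (gB counts i a b memo).2 := by
  intro n
  induction n with
  | zero =>
    intro counts i a b memo hn hM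
    have hle : counts.length ≤ i := by omega
    rw [gB]
    simp only [hle, dite_true]
    rw [List.drop_eq_nil_of_le hle, gS_nil]
    exact ⟨rfl, hM⟩
  | succ n ih =>
    intro counts i a b memo hn hM
    by_cases hle : counts.length ≤ i
    · rw [gB]
      simp only [hle, dite_true]
      rw [List.drop_eq_nil_of_le hle, gS_nil]
      exact ⟨rfl, hM⟩
    · have hi : i < counts.length := by omega
      have hdrop : counts.drop i = counts[i] :: counts.drop (i + 1) :=
        List.drop_eq_getElem_cons hi
      have hgetD : counts.getD i 0 = counts[i] := List.getD_eq_getElem counts 0 hi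
      rw [gB]
      simp only [hle, dite_false]
      cases hmg : memo.get? (i, a, b) with
      | some r => exact ⟨hM i a b r hmg, hM⟩
      | none =>
        have hfold := pv_gfold (G := gB counts (i + 1) b)
          (F := fun s => gS (counts.drop (i + 1)) b s) (P := MemoOK counts)
          (fun s m hm => ih counts (i + 1) b s m (by omega) hm)
          (counts.getD i 0 - a - b)
        have hgsi : pvOM none (pvMaxL ((PySem.List.pyRange 0
              (min (counts.getD i 0 - a - b) 2 + 1) 1).filterMap
              (fun s => (gS (counts.drop (i + 1)) b s).map
                (fun t => s + PySem.Int.floordiv (counts.getD i 0 - a - b - s) 3 + t))))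
            = gS (counts.drop i) a b := by
          rw [hdrop, gS_cons, gSl, hgetD]
          rfl
        by_cases hav : 0 ≤ counts.getD i 0 - a - b
        · rw [if_pos hav]
          obtain ⟨hf1, hf2⟩ :=
            hfold (PySem.List.pyRange 0 (min (counts.getD i 0 - a - b) 2 + 1) 1) (none, memo) hM
          have hval : (List.foldl (pvGStep (gB counts (i + 1) b) (counts.getD i 0 - a - b))
              ((none : Option Int), memo)
              (PySem.List.pyRange 0 (min (counts.getD i 0 - a - b) 2 + 1) 1)).1
              = gS (counts.drop i) a b := by
            rw [hf1]
            exact hgsi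
          have hmok : MemoOK counts
              ((List.foldl (pvGStep (gB counts (i + 1) b) (counts.getD i 0 - a - b))
                ((none : Option Int), memo)
                (PySem.List.pyRange 0 (min (counts.getD i 0 - a - b) 2 + 1) 1)).2.insert
                (i, a, b)
                (List.foldl (pvGStep (gB counts (i + 1) b) (counts.getD i 0 - a - b))
                ((none : Option Int), memo)
                (PySem.List.pyRange 0 (min (counts.getD i 0 - a - b) 2 + 1) 1)).1) := by
            intro j a' b' r hj
            rw [PySem.Dict.get?_insert] at hj
            by_cases hjk : ((j, a', b') : Nat × Int × Int) = (i, a, b)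
            · have hje : j = i ∧ a' = a ∧ b' = b := by
                injection hjk with e1 e2
                injection e2 with e2 e3
                exact ⟨e1, e2, e3⟩
              obtain ⟨rfl, rfl, rfl⟩ := hje
              rw [if_pos hjk] at hj
              simp only [Option.some_inj] at hj
              rw [← hj, hval]
            · rw [if_neg hjk] at hj
              exact hf2 j a' b' r hj
          exact ⟨hval, hmok⟩
        · rw [if_neg hav]
          have hnone : (none : Option Int) = gS (counts.drop i) a b := by
            rw [hdrop, gS_cons, gSl]
            have hre : PySem.List.pyRange 0 (min (counts[i] - a - b) 2 + 1) 1 = [] := by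
              apply pyRange_one_eq_nil
              rw [hgetD] at hav
              omega
            rw [hre]
            rfl
          have hmok : MemoOK counts (memo.insert (i, a, b) (none : Option Int)) := by
            intro j a' b' r hj
            rw [PySem.Dict.get?_insert] at hj
            by_cases hjk : ((j, a', b') : Nat × Int × Int) = (i, a, b)
            · have hje : j = i ∧ a' = a ∧ b' = b := by
                injection hjk with e1 e2
                injection e2 with e2 e3
                exact ⟨e1, e2, e3⟩
              obtain ⟨rfl, rfl, rfl⟩ := hje
              rw [if_pos hjk] at hj
              simp only [Option.some_inj] at hj
              rw [← hj, hnone]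
            · rw [if_neg hjk] at hj
              exact hM j a' b' r hj
          exact ⟨hnone, hmok⟩

theorem gB_memoOK (counts : List Int) (j : Nat) (a b : Int)
    (m : PySem.Dict (Nat × Int × Int) (Option Int)) (h : MemoOK counts m) :
    MemoOK counts (gB counts j a b m).2 :=
  (gB_ok counts.length counts j a b m (by omega) h).2

theorem foldl_memoOK {α : Type} (counts : List Int)
    (f : PySem.Dict (Nat × Int × Int) (Option Int) → α → PySem.Dict (Nat × Int × Int) (Option Int))
    (hf : ∀ m x, MemoOK counts m → MemoOK counts (f m x)) :
    ∀ (l : List α) (m : PySem.Dict (Nat × Int × Int) (Option Int)),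
    MemoOK counts m → MemoOK counts (l.foldl f m) := by
  intro l
  induction l with
  | nil => intro m hm; exact hm
  | cons x t ih => intro m hm; exact ih (f m x) (hf m x hm)

theorem solveRunB_eq (counts : List Int) : solveRunB counts = gS counts 0 0 := by
  have hm0 : MemoOK counts PySem.Dict.empty := by
    intro i a b r hr
    rw [PySem.Dict.get?_empty] at hr
    exact absurd hr (by simp)
  have hseed : MemoOK counts
      ((PySem.List.pyRange counts.length 399 (-400)).foldl (fun memo i =>
        (PySem.List.pyRange 0 3 1).foldl (fun memo a =>
          (PySem.List.pyRange 0 3 1).foldl (fun memo b =>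
            (gB counts i.toNat a b memo).2) memo) memo)
        PySem.Dict.empty) := by
    apply foldl_memoOK counts _ ?_ _ _ hm0
    intro m i hm
    apply foldl_memoOK counts _ ?_ _ _ hm
    intro m a hm
    apply foldl_memoOK counts _ ?_ _ _ hm
    intro m b hm
    exact gB_memoOK counts i.toNat a b m hm
  have h := gB_ok counts.length counts 0 0 0 _ (by omega) hseed
  simpa [solveRunB] using h.1
-- ---------- A's step as a flat merge of contributions ----------

-- merge step of A's Counter new_dp:  new_dp[k] = max(new_dp[k], v)
def pvMrg (nd : PySem.Dict (Int × Int) Int) (u : (Int × Int) × Int) : PySem.Dict (Int × Int) Int :=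
  nd.insert u.1 (max (nd.getD u.1 0) u.2)

-- all (key, value) updates A generates from one dp item at counts c, nxt
def pvContribs (c nxt : Int) (kv : (Int × Int) × Int) : List ((Int × Int) × Int) :=
  (PySem.List.pyRange 0 (min (min (c - kv.1.1) (nxt - kv.1.2)) 2 + 1) 1).map
    (fun d => ((kv.1.2 + d, d), kv.2 + d + PySem.Int.floordiv (c - kv.1.1 - d) 3))

theorem pv_foldl_flatMap {α β σ : Type} (l : List α) (g : α → List β) (f : σ → β → σ) (i : σ) :
    (l.flatMap g).foldl f i = l.foldl (fun a x => (g x).foldl f a) i := by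
  induction l generalizing i with
  | nil => rfl
  | cons h t ih => simp [List.flatMap_cons, List.foldl_append, ih]

theorem pv_stepA_eq (cnt : PySem.Dict Int Int) (dp : PySem.Dict (Int × Int) Int) (num : Int) :
    stepA cnt dp num =
      (dp.items.flatMap (pvContribs (cnt.getD num 0) (cnt.getD (num + 1) 0))).foldl
        pvMrg PySem.Dict.empty := by
  rw [pv_foldl_flatMap]
  unfold stepA
  simp only [pvContribs, List.foldl_map, pvMrg]

theorem pv_mrgfold_get?_none (L : List ((Int × Int) × Int)) (acc : PySem.Dict (Int × Int) Int)
    (k : Int × Int) :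
    ((L.foldl pvMrg acc).get? k = none) ↔ (acc.get? k = none ∧ ∀ u ∈ L, u.1 ≠ k) := by
  induction L generalizing acc with
  | nil => simp
  | cons u t ih =>
    simp only [List.foldl_cons, ih, pvMrg, PySem.Dict.get?_insert, List.mem_cons]
    by_cases hk : k = u.1
    · simp [hk]
    · rw [if_neg hk]
      constructor
      · rintro ⟨h1, h2⟩
        refine ⟨h1, ?_⟩
        rintro w (rfl | hw)
        · exact fun e => hk e.symm
        · exact h2 w hw
      · rintro ⟨h1, h2⟩
        exact ⟨h1, fun w hw => h2 w (Or.inr hw)⟩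

theorem pv_mrgfold_getD (L : List ((Int × Int) × Int)) (acc : PySem.Dict (Int × Int) Int)
    (k : Int × Int) :
    (L.foldl pvMrg acc).getD k 0 =
      ((L.filter (fun u => decide (u.1 = k))).map (fun u => u.2)).foldl max (acc.getD k 0) := by
  induction L generalizing acc with
  | nil => simp
  | cons u t ih =>
    simp only [List.foldl_cons, ih, List.filter_cons]
    by_cases hk : u.1 = k
    · simp [hk, pvMrg]
    · have h2 : (pvMrg acc u).getD k 0 = acc.getD k 0 := by
        simp only [pvMrg]
        rw [PySem.Dict.getD_insert, if_neg (fun e => hk e.symm)]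
      simp [hk, h2]

theorem pv_items_single (d : PySem.Dict (Int × Int) Int) (hnd : d.keys.Nodup)
    (k0 : Int × Int) (v0 : Int) (h0 : d.get? k0 = some v0)
    (hrest : ∀ k : Int × Int, k ≠ k0 → d.get? k = none) : d.items = [(k0, v0)] := by
  have hall : ∀ u ∈ d.items, u = (k0, v0) := by
    rintro ⟨k, w⟩ hu
    have hk : d.get? k = some w := (PySem.Dict.get?_eq_some_iff_mem_items d k w hnd).mpr hu
    by_cases he : k = k0
    · subst he
      rw [h0] at hk
      simp only [Option.some_inj] at hk
      rw [hk]
    · rw [hrest k he] at hk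
      simp at hk
  have h1 : (k0, v0) ∈ d.items := (PySem.Dict.get?_eq_some_iff_mem_items d k0 v0 hnd).mp h0
  have hndk : (d.items.map (fun u => u.1)).Nodup := hnd
  cases hit : d.items with
  | nil => rw [hit] at h1; simp at h1
  | cons a t =>
    have ha : a = (k0, v0) := hall a (by rw [hit]; exact List.mem_cons_self)
    cases t with
    | nil => rw [ha]
    | cons b t2 =>
      exfalso
      have hb : b = (k0, v0) := hall b (by rw [hit]; exact List.mem_cons_of_mem _ List.mem_cons_self)
      rw [hit, ha, hb] at hndk
      simp at hndk

-- ---------- the state valuation W and the dict invariant ----------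

-- candidates A can write at the new state (p, q) of the next tile
def pvCandW (c nxt : Int) (W : Int → Int → Option Int) (p q : Int) : List Int :=
  ([0, 1, 2] : List Int).filterMap (fun a =>
    (W a p).bind (fun w =>
      if 0 ≤ q ∧ q ≤ min (min (c - a - p) (nxt - p)) 2
      then some (w + q + PySem.Int.floordiv (c - a - p - q) 3) else none))

def stepW (c nxt : Int) (W : Int → Int → Option Int) : Int → Int → Option Int :=
  fun p q => pvMaxL (pvCandW c nxt W p q)

theorem mem_pvCandW (c nxt : Int) (W : Int → Int → Option Int) (p q z : Int) :
    z ∈ pvCandW c nxt W p q ↔ ∃ a w, 0 ≤ a ∧ a ≤ 2 ∧ W a p = some w ∧ 0 ≤ q ∧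
      q ≤ min (min (c - a - p) (nxt - p)) 2 ∧
      z = w + q + PySem.Int.floordiv (c - a - p - q) 3 := by
  simp only [pvCandW, List.mem_filterMap, Option.bind_eq_some_iff]
  constructor
  · rintro ⟨a, ha, w, hw, hz⟩
    split_ifs at hz with hc
    simp only [Option.some_inj] at hz
    have ha' : a = 0 ∨ a = 1 ∨ a = 2 := by simpa using ha
    exact ⟨a, w, by omega, by omega, hw, hc.1, hc.2, hz.symm⟩
  · rintro ⟨a, w, h0, h2, hw, hq0, hq, rfl⟩
    refine ⟨a, by simp; omega, w, hw, ?_⟩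
    rw [if_pos ⟨hq0, hq⟩]

-- the invariant tying A's dict to the valuation W
def pvInv (dpA : PySem.Dict (Int × Int) Int) (W : Int → Int → Option Int) : Prop :=
  dpA.keys.Nodup ∧
  (∀ a b, ¬(0 ≤ a ∧ a ≤ 2 ∧ 0 ≤ b ∧ b ≤ 2) → W a b = none) ∧
  (∀ a b w, W a b = some w → 0 ≤ w) ∧
  (∃ w0, W 0 0 = some w0) ∧
  (∀ x y : Int, dpA.get? (x, y) = W (x - y) y)

theorem stepW_supp (c nxt : Int) (W : Int → Int → Option Int)
    (hsupp : ∀ a b, ¬(0 ≤ a ∧ a ≤ 2 ∧ 0 ≤ b ∧ b ≤ 2) → W a b = none) :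
    ∀ p q, ¬(0 ≤ p ∧ p ≤ 2 ∧ 0 ≤ q ∧ q ≤ 2) → stepW c nxt W p q = none := by
  intro p q hpq
  have hnil : pvCandW c nxt W p q = [] := by
    rw [List.eq_nil_iff_forall_not_mem]
    intro z hz
    obtain ⟨a, w, h0, h2, hw, hq0, hq, _⟩ := (mem_pvCandW c nxt W p q z).mp hz
    by_cases hp : 0 ≤ p ∧ p ≤ 2
    · exact hpq ⟨hp.1, hp.2, hq0, by omega⟩
    · rw [hsupp a p (by omega)] at hw
      exact absurd hw (by simp)
  rw [stepW, hnil]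
  rfl

theorem pv_contrib_mem (c nxt : Int) (dpA : PySem.Dict (Int × Int) Int)
    (W : Int → Int → Option Int) (hnd : dpA.keys.Nodup)
    (hsupp : ∀ a b, ¬(0 ≤ a ∧ a ≤ 2 ∧ 0 ≤ b ∧ b ≤ 2) → W a b = none)
    (hget : ∀ x y : Int, dpA.get? (x, y) = W (x - y) y)
    (u : (Int × Int) × Int) :
    u ∈ dpA.items.flatMap (pvContribs c nxt) ↔
      ∃ a p d w, W a p = some w ∧ 0 ≤ d ∧ d ≤ min (min (c - a - p) (nxt - p)) 2 ∧
        u = ((p + d, d), w + d + PySem.Int.floordiv (c - a - p - d) 3) := by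
  rw [List.mem_flatMap]
  constructor
  · rintro ⟨⟨⟨x, y⟩, w⟩, hkv, hu⟩
    have hsome : dpA.get? (x, y) = some w :=
      (PySem.Dict.get?_eq_some_iff_mem_items dpA (x, y) w hnd).mpr hkv
    rw [hget x y] at hsome
    simp only [pvContribs, List.mem_map, PySem.List.mem_pyRange_one] at hu
    obtain ⟨d, ⟨hd0, hd1⟩, hu⟩ := hu
    refine ⟨x - y, y, d, w, hsome, hd0, by omega, ?_⟩
    rw [← hu]
    have e1 : c - (x - y) - y = c - x := by ring
    rw [e1]
  · rintro ⟨a, p, d, w, hw, hd0, hd, hu⟩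
    have hbox : 0 ≤ a ∧ a ≤ 2 ∧ 0 ≤ p ∧ p ≤ 2 := by
      by_contra hc
      rw [hsupp a p hc] at hw
      exact absurd hw (by simp)
    refine ⟨((a + p, p), w), ?_, ?_⟩
    · apply (PySem.Dict.get?_eq_some_iff_mem_items dpA (a + p, p) w hnd).mp
      rw [hget (a + p) p]
      have e1 : a + p - p = a := by ring
      rw [e1, hw]
    · simp only [pvContribs, List.mem_map, PySem.List.mem_pyRange_one]
      refine ⟨d, ⟨hd0, by omega⟩, ?_⟩
      rw [hu]
      have e1 : c - (a + p) - d = c - a - p - d := by ring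
      rw [e1]

theorem pv_step_inv (cnt : PySem.Dict Int Int) (num : Int)
    (dpA : PySem.Dict (Int × Int) Int) (W : Int → Int → Option Int)
    (hc : 0 ≤ cnt.getD num 0) (hn : 0 ≤ cnt.getD (num + 1) 0)
    (h : pvInv dpA W) :
    pvInv (stepA cnt dpA num) (stepW (cnt.getD num 0) (cnt.getD (num + 1) 0) W) := by
  obtain ⟨hnd, hsupp, hnn, ⟨w0, hw0⟩, hget⟩ := h
  set c := cnt.getD num 0 with hcdef
  set nxt := cnt.getD (num + 1) 0 with hndef
  have hmem := pv_contrib_mem c nxt dpA W hnd hsupp hget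
  have hcand_nn : ∀ p q z, z ∈ pvCandW c nxt W p q → 0 ≤ z := by
    intro p q z hz
    obtain ⟨a, w, _, _, hw, hq0, hq, rfl⟩ := (mem_pvCandW c nxt W p q z).mp hz
    have h1 := hnn a p w hw
    have h2 := pv_fdiv3_nonneg (c - a - p - q) (by omega)
    omega
  refine ⟨?_, stepW_supp c nxt W hsupp, ?_, ?_, ?_⟩
  · -- keys of the new dict stay unique
    rw [pv_stepA_eq]
    exact PySem.Dict.nodup_keys_foldl_insert_key _ (fun u : (Int × Int) × Int => u.1)
      (fun nd u => max (nd.getD u.1 0) u.2) _ PySem.Dict.nodup_keys_empty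
  · -- values stay nonnegative
    intro p q w hw
    exact hcand_nn p q w (pvMaxL_mem _ _ hw)
  · -- the state (0, 0) stays populated
    have hz : (w0 + 0 + PySem.Int.floordiv (c - 0 - 0 - 0) 3) ∈ pvCandW c nxt W 0 0 := by
      rw [mem_pvCandW]
      exact ⟨0, w0, le_refl 0, by omega, hw0, le_refl 0, by omega, rfl⟩
    obtain ⟨m, hm, _⟩ := pvMaxL_some_of_mem _ _ hz
    exact ⟨m, hm⟩
  · -- the merged dict realises stepW
    intro x y
    rw [pv_stepA_eq, ← hcdef, ← hndef]
    have hMV : ∀ z : Int,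
        z ∈ ((dpA.items.flatMap (pvContribs c nxt)).filter
              (fun u => decide (u.1 = ((x, y) : Int × Int)))).map (fun u => u.2) ↔
        z ∈ pvCandW c nxt W (x - y) y := by
      intro z
      simp only [List.mem_map, List.mem_filter, decide_eq_true_eq]
      constructor
      · rintro ⟨u, ⟨hu, hk⟩, rfl⟩
        obtain ⟨a, p, d, w, hw, hd0, hd, rfl⟩ := (hmem u).mp hu
        simp only [Prod.mk.injEq] at hk
        have hp : p = x - y := by omega
        have hdy : d = y := by omega
        rw [mem_pvCandW]
        exact ⟨a, w, by
          by_contra hbox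
          rw [hsupp a p (by omega)] at hw
          exact absurd hw (by simp), by
          by_contra hbox
          rw [hsupp a p (by omega)] at hw
          exact absurd hw (by simp), by rw [← hp]; exact hw, by omega, by omega, by
          rw [← hp, ← hdy]⟩
      · rintro hz
        obtain ⟨a, w, h0, h2, hw, hq0, hq, rfl⟩ := (mem_pvCandW c nxt W (x - y) y z).mp hz
        refine ⟨(((x - y) + y, y), w + y + PySem.Int.floordiv (c - a - (x - y) - y) 3), ⟨?_, ?_⟩, rfl⟩
        · exact (hmem _).mpr ⟨a, x - y, y, w, hw, hq0, hq, rfl⟩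
        · simp only [Prod.mk.injEq]
          constructor
          · omega
          · trivial
    cases hcand : pvCandW c nxt W (x - y) y with
    | nil =>
      have hnone : ((dpA.items.flatMap (pvContribs c nxt)).foldl pvMrg PySem.Dict.empty).get?
          (x, y) = none := by
        rw [pv_mrgfold_get?_none]
        refine ⟨PySem.Dict.get?_empty _, ?_⟩
        intro u hu hk
        have : u.2 ∈ pvCandW c nxt W (x - y) y := by
          rw [← hMV]
          exact List.mem_map_of_mem (List.mem_filter.mpr ⟨hu, by simp [hk]⟩)
        rw [hcand] at this
        simp at this
      rw [hnone, stepW, hcand]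
      rfl
    | cons z0 zs =>
      have hzmem : z0 ∈ pvCandW c nxt W (x - y) y := by rw [hcand]; exact List.mem_cons_self
      obtain ⟨m, hm, hz0m⟩ := pvMaxL_some_of_mem _ _ hzmem
      have hne : ((dpA.items.flatMap (pvContribs c nxt)).foldl pvMrg PySem.Dict.empty).get?
          (x, y) ≠ none := by
        intro hcontra
        rw [pv_mrgfold_get?_none] at hcontra
        have hz0' : z0 ∈ ((dpA.items.flatMap (pvContribs c nxt)).filter
            (fun u => decide (u.1 = ((x, y) : Int × Int)))).map (fun u => u.2) := by
          rw [hMV]; exact hzmem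
        simp only [List.mem_map, List.mem_filter, decide_eq_true_eq] at hz0'
        obtain ⟨u, ⟨hu, hk⟩, _⟩ := hz0'
        exact hcontra.2 u hu hk
      cases hw : ((dpA.items.flatMap (pvContribs c nxt)).foldl pvMrg PySem.Dict.empty).get?
          (x, y) with
      | none => exact absurd hw hne
      | some v =>
        have hvD : ((dpA.items.flatMap (pvContribs c nxt)).foldl pvMrg PySem.Dict.empty).getD
            (x, y) 0 = v := by
          rw [PySem.Dict.getD_eq_get?_getD, hw]
          rfl
        rw [pv_mrgfold_getD] at hvD
        rw [PySem.Dict.getD_empty] at hvD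
        have hvm : v = m := by
          have hub : ((((dpA.items.flatMap (pvContribs c nxt)).filter
              (fun u => decide (u.1 = ((x, y) : Int × Int)))).map (fun u => u.2)).foldl max 0) ≤ m := by
            apply pv_foldl_max_le
            · exact hcand_nn _ _ m (pvMaxL_mem _ _ hm)
            · intro z hz
              exact pvMaxL_isMax _ _ hm z ((hMV z).mp hz)
          have hlb : m ≤ (((dpA.items.flatMap (pvContribs c nxt)).filter
              (fun u => decide (u.1 = ((x, y) : Int × Int)))).map (fun u => u.2)).foldl max 0 := by
            apply (PySem.List.le_foldl_max _ 0).2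
            rw [hMV]
            exact pvMaxL_mem _ _ hm
          omega
        simp only [stepW]
        rw [hm, hvm]
-- ---------- forward fold over a run = backward recursion gS (exchange lemma) ----------

def foldW : List Int → (Int → Int → Option Int) → Int → Int → Option Int
  | [], W => W
  | c :: rest, W => foldW rest (stepW c (rest.headD 0) W)

def pvPairs : List (Int × Int) :=
  [(0, 0), (0, 1), (0, 2), (1, 0), (1, 1), (1, 2), (2, 0), (2, 1), (2, 2)]

def pvFin (cs : List Int) (W : Int → Int → Option Int) : List Int :=
  pvPairs.filterMap (fun ab =>
    (W ab.1 ab.2).bind (fun w => (gS cs ab.1 ab.2).map (fun t => w + t)))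

theorem mem_pvPairs (a b : Int) :
    (a, b) ∈ pvPairs ↔ (0 ≤ a ∧ a ≤ 2 ∧ 0 ≤ b ∧ b ≤ 2) := by
  simp [pvPairs, Prod.ext_iff]
  omega

theorem mem_pvFin (cs : List Int) (W : Int → Int → Option Int) (z : Int) :
    z ∈ pvFin cs W ↔ ∃ a b w t, (0 ≤ a ∧ a ≤ 2 ∧ 0 ≤ b ∧ b ≤ 2) ∧ W a b = some w ∧
      gS cs a b = some t ∧ z = w + t := by
  simp only [pvFin, List.mem_filterMap, Option.bind_eq_some_iff, Option.map_eq_some_iff]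
  constructor
  · rintro ⟨⟨a, b⟩, hab, w, hw, t, ht, rfl⟩
    exact ⟨a, b, w, t, (mem_pvPairs a b).mp hab, hw, ht, rfl⟩
  · rintro ⟨a, b, w, t, hbox, hw, ht, rfl⟩
    exact ⟨(a, b), (mem_pvPairs a b).mpr hbox, w, hw, t, ht, rfl⟩

theorem pvEX : ∀ (cs : List Int) (W : Int → Int → Option Int), cs ≠ [] →
    (∀ a b, ¬(0 ≤ a ∧ a ≤ 2 ∧ 0 ≤ b ∧ b ≤ 2) → W a b = none) →
    ∀ p q, foldW cs W p q = if p = 0 ∧ q = 0 then pvMaxL (pvFin cs W) else none := by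
  intro cs
  induction cs with
  | nil => intro W h; exact absurd rfl h
  | cons c rest ih =>
    intro W _ hsupp p q
    cases rest with
    | nil =>
      -- last value of the run: nxt = 0 collapses everything into (0, 0)
      have hfw : foldW [c] W p q = stepW c 0 W p q := rfl
      rw [hfw]
      by_cases hpq : p = 0 ∧ q = 0
      · obtain ⟨rfl, rfl⟩ := hpq
        rw [if_pos ⟨rfl, rfl⟩]
        simp only [stepW]
        apply pvMaxL_eq_of_dominates
        · intro z hz
          obtain ⟨a, w, h0, h2, hw, _, hq, rfl⟩ := (mem_pvCandW c 0 W 0 0 z).mp hz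
          have hca : 0 ≤ c - a := by omega
          have hz1 : (0 + PySem.Int.floordiv (c - a - 0 - 0) 3 + 0) ∈ gSl c [] a 0 := by
            rw [mem_gSl]
            refine ⟨0, 0, le_refl 0, by omega, ?_, rfl⟩
            rw [gS_nil]
            rfl
          obtain ⟨m, hm, hle⟩ := pvMaxL_some_of_mem _ _ hz1
          refine ⟨w + m, ?_, by omega⟩
          rw [mem_pvFin]
          exact ⟨a, 0, w, m, ⟨h0, h2, le_refl 0, by omega⟩, hw, by rw [gS_cons, hm], rfl⟩
        · intro z hz
          obtain ⟨a, b, w, T, hbox, hw, hT, rfl⟩ := (mem_pvFin [c] W z).mp hz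
          rw [gS_cons] at hT
          obtain ⟨s, t', hs0, hs, ht', hTe⟩ := (mem_gSl c [] a b T).mp (pvMaxL_mem _ _ hT)
          rw [gS_nil] at ht'
          by_cases hbs : b = 0 ∧ s = 0
          · obtain ⟨rfl, rfl⟩ := hbs
            rw [if_pos ⟨rfl, rfl⟩] at ht'
            simp only [Option.some_inj] at ht'
            refine ⟨w + 0 + PySem.Int.floordiv (c - a - 0 - 0) 3, ?_, by omega⟩
            rw [mem_pvCandW]
            exact ⟨a, w, hbox.1, hbox.2.1, hw, le_refl 0, by omega, rfl⟩
          · rw [if_neg hbs] at ht'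
            exact absurd ht' (by simp)
      · rw [if_neg hpq]
        by_cases hbox : 0 ≤ p ∧ p ≤ 2 ∧ 0 ≤ q ∧ q ≤ 2
        · simp only [stepW]
          have hnil : pvCandW c 0 W p q = [] := by
            rw [List.eq_nil_iff_forall_not_mem]
            intro z hz
            obtain ⟨a, w, h0, h2, hw, hq0, hq, _⟩ := (mem_pvCandW c 0 W p q z).mp hz
            exact hpq ⟨by omega, by omega⟩
          rw [hnil]
          rfl
        · exact stepW_supp c 0 W hsupp p q hbox
    | cons c' rest' =>
      have hfw : foldW (c :: c' :: rest') W p q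
          = foldW (c' :: rest') (stepW c c' W) p q := rfl
      rw [hfw, ih (stepW c c' W) (by simp) (stepW_supp c c' W hsupp) p q]
      by_cases hpq : p = 0 ∧ q = 0
      · rw [if_pos hpq, if_pos hpq]
        apply pvMaxL_eq_of_dominates
        · -- every value reachable after the step is dominated by a direct gS value
          intro z hz
          obtain ⟨b, s, w', t, hbox, hW', ht, rfl⟩ :=
            (mem_pvFin (c' :: rest') (stepW c c' W) z).mp hz
          obtain ⟨a, w, h0, h2, hw, hs0, hs, rfl⟩ :=
            (mem_pvCandW c c' W b s w').mp (pvMaxL_mem _ _ hW')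
          have hgl : (s + PySem.Int.floordiv (c - a - b - s) 3 + t) ∈ gSl c (c' :: rest') a b := by
            rw [mem_gSl]
            exact ⟨s, t, hs0, by omega, ht, rfl⟩
          obtain ⟨T, hT, hle⟩ := pvMaxL_some_of_mem _ _ hgl
          refine ⟨w + T, ?_, by omega⟩
          rw [mem_pvFin]
          exact ⟨a, b, w, T, ⟨h0, h2, hbox.1, hbox.2.1⟩, hw, by rw [gS_cons, hT], rfl⟩
        · -- every direct gS value is dominated by a value reachable after the step
          intro z hz
          obtain ⟨a, b, w, T, hbox, hw, hT, rfl⟩ :=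
            (mem_pvFin (c :: c' :: rest') W z).mp hz
          rw [gS_cons] at hT
          obtain ⟨s, t, hs0, hs, ht, hTe⟩ := (mem_gSl c (c' :: rest') a b T).mp (pvMaxL_mem _ _ hT)
          have havail : 0 ≤ c' - b - s := gS_avail_nonneg c' rest' b s t ht
          have hcel : (w + s + PySem.Int.floordiv (c - a - b - s) 3) ∈ pvCandW c c' W b s := by
            rw [mem_pvCandW]
            exact ⟨a, w, hbox.1, hbox.2.1, hw, hs0, by omega, rfl⟩
          obtain ⟨w', hw', hle⟩ := pvMaxL_some_of_mem _ _ hcel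
          refine ⟨w' + t, ?_, by omega⟩
          rw [mem_pvFin]
          exact ⟨b, s, w', t, ⟨hbox.2.2.1, hbox.2.2.2, hs0, by omega⟩, hw', ht, rfl⟩
      · rw [if_neg hpq, if_neg hpq]
-- ---------- runs of consecutive values ----------

def pvSingleW (S : Int) : Int → Int → Option Int :=
  fun a b => if a = 0 ∧ b = 0 then some S else none

theorem supp_single (S : Int) :
    ∀ a b, ¬(0 ≤ a ∧ a ≤ 2 ∧ 0 ≤ b ∧ b ≤ 2) → pvSingleW S a b = none := by
  intro a b h
  unfold pvSingleW
  rw [if_neg]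
  intro hc
  exact h ⟨by omega, by omega, by omega, by omega⟩

theorem pvInv_ext (dp : PySem.Dict (Int × Int) Int) (W W' : Int → Int → Option Int)
    (h : pvInv dp W) (he : ∀ a b, W a b = W' a b) : pvInv dp W' := by
  obtain ⟨h1, h2, h3, ⟨w0, h4⟩, h5⟩ := h
  refine ⟨h1, ?_, ?_, ⟨w0, by rw [← he 0 0]; exact h4⟩, ?_⟩
  · intro a b hb
    rw [← he a b]
    exact h2 a b hb
  · intro a b w hw
    rw [← he a b] at hw
    exact h3 a b w hw
  · intro x y
    rw [← he (x - y) y]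
    exact h5 x y

def pvRunOK (cnt : PySem.Dict Int Int) : List Int → Prop
  | [] => True
  | [u] => cnt.getD (u + 1) 0 = 0
  | u :: u' :: t => u' = u + 1 ∧ pvRunOK cnt (u' :: t)

theorem fold_run (cnt : PySem.Dict Int Int) (hpos : ∀ k : Int, 0 ≤ cnt.getD k 0) :
    ∀ (run : List Int) (dpA : PySem.Dict (Int × Int) Int) (W : Int → Int → Option Int),
    pvInv dpA W → pvRunOK cnt run →
    pvInv (run.foldl (stepA cnt) dpA) (foldW (run.map (fun u => cnt.getD u 0)) W) := by
  intro run
  induction run with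
  | nil => intro dpA W h _; exact h
  | cons u us ih =>
    intro dpA W h hok
    cases us with
    | nil =>
      have hz : cnt.getD (u + 1) 0 = 0 := hok
      have hstep := pv_step_inv cnt u dpA W (hpos u) (hpos (u + 1)) h
      rw [hz] at hstep
      exact hstep
    | cons u' us' =>
      have h1 : u' = u + 1 := hok.1
      have hstep := pv_step_inv cnt u dpA W (hpos u) (hpos (u + 1)) h
      rw [← h1] at hstep
      exact ih (stepA cnt dpA u) (stepW (cnt.getD u 0) (cnt.getD u' 0) W) hstep hok.2

theorem takeRunB_append : ∀ (vr : List Int) (v : Int),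
    v :: vr = (takeRunB v vr).1 ++ (takeRunB v vr).2 := by
  intro vr
  induction vr with
  | nil => intro v; simp [takeRunB]
  | cons w t ih =>
    intro v
    simp only [takeRunB]
    split
    · rw [List.cons_append, ← ih w]
    · simp

theorem takeRunB_fst_ne_nil (v : Int) (vr : List Int) : (takeRunB v vr).1 ≠ [] := by
  cases vr with
  | nil => simp [takeRunB]
  | cons w t =>
    simp only [takeRunB]
    split <;> simp

theorem takeRunB_fst_head (vr : List Int) (v : Int) :
    ∃ t', (takeRunB v vr).1 = v :: t' := by
  cases vr with
  | nil => exact ⟨[], rfl⟩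
  | cons w t =>
    simp only [takeRunB]
    split
    · exact ⟨(takeRunB w t).1, rfl⟩
    · exact ⟨[], rfl⟩

theorem takeRunB_runOK (cnt : PySem.Dict Int Int) : ∀ (vr : List Int) (v : Int),
    (v :: vr).Pairwise (· < ·) →
    (∀ u : Int, u ∈ v :: vr → u + 1 ∉ v :: vr → cnt.getD (u + 1) 0 = 0) →
    pvRunOK cnt (takeRunB v vr).1 := by
  intro vr
  induction vr with
  | nil =>
    intro v _ hgap
    show cnt.getD (v + 1) 0 = 0
    apply hgap v List.mem_cons_self
    intro hmem
    rcases List.mem_singleton.mp hmem with h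
    omega
  | cons w t ih =>
    intro v hpw hgap
    by_cases hw : w = v + 1
    · have hfst : (takeRunB v (w :: t)).1 = v :: (takeRunB w t).1 := by
        simp [takeRunB, hw]
      rw [hfst]
      obtain ⟨t', ht'⟩ := takeRunB_fst_head t w
      have htail : pvRunOK cnt (takeRunB w t).1 := by
        apply ih w (List.Pairwise.of_cons hpw)
        intro u hu hnot
        apply hgap u (List.mem_cons_of_mem _ hu)
        intro hmem
        rcases List.mem_cons.mp hmem with he | hmem2
        · have hv : v < u := (List.pairwise_cons.mp hpw).1 u hu
          omega
        · exact hnot hmem2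
      rw [ht'] at htail ⊢
      exact ⟨hw, htail⟩
    · have hfst : (takeRunB v (w :: t)).1 = [v] := by
        simp [takeRunB, hw]
      rw [hfst]
      show cnt.getD (v + 1) 0 = 0
      apply hgap v List.mem_cons_self
      intro hmem
      have hvw : v < w := (List.pairwise_cons.mp hpw).1 w List.mem_cons_self
      rcases List.mem_cons.mp hmem with he | hmem2
      · omega
      · rcases List.mem_cons.mp hmem2 with he | hmem3
        · exact hw he.symm
        · have h1 : w < v + 1 := ((List.pairwise_cons.mp (List.Pairwise.of_cons hpw)).1) _ hmem3
          omega

-- ---------- collapsing the table after a completed run ----------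

theorem pv_collapse (cs : List Int) (S t : Int) (hne : cs ≠ []) (hts : gS cs 0 0 = some t) :
    ∀ a b, foldW cs (pvSingleW S) a b = pvSingleW (S + t) a b := by
  intro a b
  rw [pvEX cs (pvSingleW S) hne (supp_single S) a b]
  by_cases hab : a = 0 ∧ b = 0
  · rw [if_pos hab, show pvSingleW (S + t) a b = some (S + t) from by
      unfold pvSingleW; rw [if_pos hab]]
    have hmem : (S + t) ∈ pvFin cs (pvSingleW S) := by
      rw [mem_pvFin]
      refine ⟨0, 0, S, t, ⟨le_refl 0, by omega, le_refl 0, by omega⟩, ?_, hts, rfl⟩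
      unfold pvSingleW
      rw [if_pos ⟨rfl, rfl⟩]
    have hall : ∀ z ∈ pvFin cs (pvSingleW S), z = S + t := by
      intro z hz
      obtain ⟨a', b', w, t', _, hw, ht', rfl⟩ := (mem_pvFin cs (pvSingleW S) z).mp hz
      unfold pvSingleW at hw
      split_ifs at hw with hc
      obtain ⟨rfl, rfl⟩ := hc
      simp only [Option.some_inj] at hw
      rw [hts] at ht'
      simp only [Option.some_inj] at ht'
      omega
    obtain ⟨m, hm, hle⟩ := pvMaxL_some_of_mem _ _ hmem
    have hmv : m = S + t := hall m (pvMaxL_mem _ _ hm)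
    rw [hm, hmv]
  · rw [if_neg hab, show pvSingleW (S + t) a b = none from by
      unfold pvSingleW; rw [if_neg hab]]

-- ---------- the initial dict realises the single state (0,0) ↦ 0 ----------

theorem pvInv_init :
    pvInv (PySem.Dict.ofList [(((0 : Int), (0 : Int)), (0 : Int))]) (pvSingleW 0) := by
  have he : PySem.Dict.ofList [(((0 : Int), (0 : Int)), (0 : Int))] =
      PySem.Dict.empty.insert ((0 : Int), (0 : Int)) (0 : Int) := by decide
  refine ⟨by decide, supp_single 0, ?_, ⟨0, by unfold pvSingleW; rw [if_pos ⟨rfl, rfl⟩]⟩, ?_⟩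
  · intro a b w hw
    unfold pvSingleW at hw
    split_ifs at hw
    simp only [Option.some_inj] at hw
    omega
  · intro x y
    rw [he, PySem.Dict.get?_insert]
    unfold pvSingleW
    by_cases hxy : ((x, y) : Int × Int) = (0, 0)
    · have hx0 : x = 0 := congrArg Prod.fst hxy
      have hy0 : y = 0 := congrArg Prod.snd hxy
      have hc : x - y = 0 ∧ y = 0 := by omega
      rw [if_pos hxy, if_pos hc]
    · rw [if_neg hxy, PySem.Dict.get?_empty, if_neg]
      intro hc
      exact hxy (by
        have hx : x = 0 := by omega
        have hy : y = 0 := by omega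
        rw [hx, hy])

theorem pv_maxD_single (S : Int) : PySem.List.maxD [S] (fun x => x) 0 = S := by
  rw [PySem.List.maxD, PySem.List.max?_id_cons]
  rfl

-- ---------- the main induction over the runs ----------

theorem pv_base (dpA : PySem.Dict (Int × Int) Int) (S : Int)
    (hinv : pvInv dpA (pvSingleW S)) :
    PySem.List.maxD dpA.values (fun x => x) 0 = S := by
  obtain ⟨hnd, _, _, _, hget⟩ := hinv
  have h00 : dpA.get? (0, 0) = some S := by
    rw [hget 0 0]
    unfold pvSingleW
    rw [if_pos ⟨by omega, rfl⟩]
  have hrest : ∀ k : Int × Int, k ≠ (0, 0) → dpA.get? k = none := by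
    rintro ⟨x, y⟩ hk
    rw [hget x y]
    unfold pvSingleW
    rw [if_neg]
    intro hc
    exact hk (by
      have hx : x = 0 := by omega
      have hy : y = 0 := by omega
      rw [hx, hy])
  have hitems := pv_items_single dpA hnd (0, 0) S h00 hrest
  have hvals : dpA.values = [S] := by
    show dpA.items.map (fun u => u.2) = [S]
    rw [hitems]
    rfl
  rw [hvals, pv_maxD_single]

theorem solveAllB_nil (cnt : PySem.Dict Int Int) : solveAllB cnt [] = 0 := by
  rw [solveAllB]

theorem pv_main (cnt : PySem.Dict Int Int) (hpos : ∀ k : Int, 0 ≤ cnt.getD k 0) :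
    ∀ (n : Nat) (vals : List Int) (dpA : PySem.Dict (Int × Int) Int) (S : Int),
    vals.length ≤ n → 0 ≤ S → pvInv dpA (pvSingleW S) →
    vals.Pairwise (· < ·) →
    (∀ u : Int, u ∈ vals → u + 1 ∉ vals → cnt.getD (u + 1) 0 = 0) →
    PySem.List.maxD (vals.foldl (stepA cnt) dpA).values (fun x => x) 0
      = S + solveAllB cnt vals := by
  intro n
  induction n with
  | zero =>
    intro vals dpA S hlen hS hinv _ _
    have hnil : vals = [] := List.eq_nil_of_length_eq_zero (by omega)
    subst hnil
    simp only [List.foldl_nil]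
    rw [pv_base dpA S hinv, solveAllB_nil]
    omega
  | succ n ih =>
    intro vals dpA S hlen hS hinv hpw hgap
    cases vals with
    | nil =>
      simp only [List.foldl_nil]
      rw [pv_base dpA S hinv, solveAllB_nil]
      omega
    | cons v vr =>
      have happ : v :: vr = (takeRunB v vr).1 ++ (takeRunB v vr).2 := takeRunB_append vr v
      have hcs_ne : (takeRunB v vr).1.map (fun u => cnt.getD u 0) ≠ [] := by
        intro hc
        exact takeRunB_fst_ne_nil v vr (List.map_eq_nil_iff.mp hc)
      have hrunok := takeRunB_runOK cnt vr v hpw hgap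
      have hinv1 := fold_run cnt hpos (takeRunB v vr).1 dpA (pvSingleW S) hinv hrunok
      have hcpos : ∀ c ∈ (takeRunB v vr).1.map (fun u => cnt.getD u 0), 0 ≤ c := by
        intro c hc
        obtain ⟨u, _, rfl⟩ := List.mem_map.mp hc
        exact hpos u
      obtain ⟨t, hts, ht0⟩ := gS_zero_some _ hcpos
      have hinv2 : pvInv ((takeRunB v vr).1.foldl (stepA cnt) dpA) (pvSingleW (S + t)) :=
        pvInv_ext _ _ _ hinv1 (pv_collapse _ S t hcs_ne hts)
      have hpw' : (takeRunB v vr).2.Pairwise (· < ·) := by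
        rw [happ] at hpw
        exact (List.pairwise_append.mp hpw).2.1
      have hcross : ∀ x ∈ (takeRunB v vr).1, ∀ y ∈ (takeRunB v vr).2, x < y := by
        rw [happ] at hpw
        exact (List.pairwise_append.mp hpw).2.2
      have hgap' : ∀ u : Int, u ∈ (takeRunB v vr).2 → u + 1 ∉ (takeRunB v vr).2 →
          cnt.getD (u + 1) 0 = 0 := by
        intro u hu hnot
        apply hgap u (by rw [happ]; exact List.mem_append_right _ hu)
        intro hmem
        rw [happ] at hmem
        rcases List.mem_append.mp hmem with hm1 | hm2
        · have := hcross (u + 1) hm1 u hu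
          omega
        · exact hnot hm2
      have hlen' : (takeRunB v vr).2.length ≤ n := by
        have := takeRunB_snd_length v vr
        simp only [List.length_cons] at hlen
        omega
      have hIH := ih (takeRunB v vr).2 ((takeRunB v vr).1.foldl (stepA cnt) dpA) (S + t)
        hlen' (by omega) hinv2 hpw' hgap'
      have hsolve : solveAllB cnt (v :: vr)
          = (solveRunB ((takeRunB v vr).1.map (fun u => cnt.getD u 0))).getD 0
            + solveAllB cnt (takeRunB v vr).2 := by
        rw [solveAllB]
      have hgBv : (solveRunB ((takeRunB v vr).1.map (fun u => cnt.getD u 0))).getD 0 = t := by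
        rw [solveRunB_eq, hts]
        rfl
      calc PySem.List.maxD ((v :: vr).foldl (stepA cnt) dpA).values (fun x => x) 0
          = PySem.List.maxD (((takeRunB v vr).2).foldl (stepA cnt)
              ((takeRunB v vr).1.foldl (stepA cnt) dpA)).values (fun x => x) 0 := by
            rw [happ, List.foldl_append]
        _ = (S + t) + solveAllB cnt (takeRunB v vr).2 := hIH
        _ = S + solveAllB cnt (v :: vr) := by
            rw [hsolve, hgBv]
            omega

-- ---------- the two ports agree ----------

theorem maxGroupNumber_agree (tiles : List Int) :
    maxGroupNumber tiles = maxGroupNumber_alt tiles := by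
  simp only [maxGroupNumber, maxGroupNumber_alt]
  have hpos : ∀ k : Int, 0 ≤ (PySem.Dict.counter tiles).getD k 0 := by
    intro k
    rw [PySem.Dict.getD_counter]
    exact Int.natCast_nonneg _
  have hpw : (PySem.List.sorted (PySem.Dict.counter tiles).keys (fun x => x) false).Pairwise
      (· < ·) := by
    rw [PySem.Dict.keys_counter]
    exact PySem.List.sorted_ofList_pairwise_lt tiles
  have hgap : ∀ u : Int,
      u ∈ PySem.List.sorted (PySem.Dict.counter tiles).keys (fun x => x) false →
      u + 1 ∉ PySem.List.sorted (PySem.Dict.counter tiles).keys (fun x => x) false →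
      (PySem.Dict.counter tiles).getD (u + 1) 0 = 0 := by
    intro u _ hnot
    have hnotin : (u + 1) ∉ tiles := by
      intro hmem
      apply hnot
      rw [PySem.List.mem_sorted, PySem.Dict.keys_counter, PySem.Set.mem_ofList]
      exact hmem
    rw [PySem.Dict.getD_counter, List.count_eq_zero.mpr hnotin]
    rfl
  have hmain := pv_main (PySem.Dict.counter tiles) hpos
    (PySem.List.sorted (PySem.Dict.counter tiles).keys (fun x => x) false).length
    (PySem.List.sorted (PySem.Dict.counter tiles).keys (fun x => x) false)
    (PySem.Dict.ofList [(((0 : Int), (0 : Int)), (0 : Int))]) 0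
    (le_refl _) (le_refl 0) pvInv_init hpw hgap
  rw [hmain]
  omega

-- ===== VERDICT (by name: the statement is the Claim_ definition above) =====
theorem maxGroupNumber_spec : Claim_equal_maxGroupNumber := by
  intro tiles _
  unfold Spec_maxGroupNumber
  exact maxGroupNumber_agree tiles
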